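-- pv_equiv track=rewrite | github.com/981377660LMT/algorithm-study | 6_tree/树状数组/经典题/456. 132 模式-三元组计数.py | count1324
-- ===== SOURCE A (Python) =====
-- from typing import List
--
-- def count1324(nums: List[int]) -> int:
--     """统计1324模式的个数 O(n^2)
--
--     nums[i] < nums[k] < nums[j] < nums[l]
--
--     枚举第二个（"i2"）和第四个（"i4"）元素，然后统计第一个（"i1"）和第三个（"i3"）元素的个数
--     然后对于每个 "i2" "i4" 对，统计以 "i2" 为 "中间" 的、且在 "i4" 之前的 132 模式数量。
--     """
--     n = len(nums)
--     res = 0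
--     counter = [0] * n  # 以 i2 为 "中间" 的 "132" 模式的数量
--     for i4 in range(n):
--         bigger = 0
--         for i2 in range(i4):
--             if nums[i4] > nums[i2]:
--                 res += counter[i2]
--                 bigger += 1
--             else:
--                 counter[i2] += bigger
--     return res
-- ===== SOURCE B (Python) =====
-- from typing import List
--
-- def count1324(nums: List[int]) -> int:
--     """Count quadruples i1<i2<i3<i4 with nums[i1] < nums[i3] <= nums[i2] < nums[i4]:
--     enumerate the middle pair (i2, i3) and multiply two independent counts, a
--     prefix-count row for valid i1 and a precomputed suffix-count matrix for valid i4."""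
--     n = len(nums)
--     # G[i3][j] = number of i4 > i3 with nums[i4] > nums[j]
--     G = []
--     grow = [0] * n
--     for i3 in range(n - 1, -1, -1):
--         G.append(grow)
--         grow = [grow[j] + (1 if nums[i3] > nums[j] else 0) for j in range(n)]
--     G.reverse()
--     res = 0
--     row = [0] * n  # row[j] = number of i1 < i2 with nums[i1] < nums[j]
--     for i2 in range(n):
--         for i3 in range(n):
--             if i3 > i2 and nums[i3] <= nums[i2]:
--                 res += row[i3] * G[i3][i2]
--         row = [row[j] + (1 if nums[i2] < nums[j] else 0) for j in range(n)]
--     return res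
-- ===== Notes on version B (the rewrite author's own statement) =====
-- stated objective: alternative
-- what changed: B replaces A's forward (i4,i2) sweep with its per-index counter array and running 'bigger' accumulator by a direct enumeration of the middle pair (i2,i3) with nums[i3] <= nums[i2], multiplying an incrementally maintained prefix count of valid i1 by a precomputed suffix-count matrix entry for valid i4.
import Mathlib
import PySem

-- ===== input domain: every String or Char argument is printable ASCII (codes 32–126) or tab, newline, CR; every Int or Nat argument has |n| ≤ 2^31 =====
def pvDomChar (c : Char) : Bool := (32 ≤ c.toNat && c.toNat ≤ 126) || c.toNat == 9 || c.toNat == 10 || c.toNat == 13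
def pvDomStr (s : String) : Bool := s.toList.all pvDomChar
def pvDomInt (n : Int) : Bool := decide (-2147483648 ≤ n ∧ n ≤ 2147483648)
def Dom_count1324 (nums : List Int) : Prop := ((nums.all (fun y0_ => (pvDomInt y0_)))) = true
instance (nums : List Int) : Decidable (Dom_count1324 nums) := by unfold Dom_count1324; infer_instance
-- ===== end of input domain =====

-- B is an alternative decomposition of the same exact count: it enumerates the middle
-- pair (i2,i3) and multiplies an incrementally maintained prefix count of valid i1 by a
-- precomputed suffix-count matrix entry for valid i4, instead of A's forward (i4,i2)
-- accumulator with a per-i2 counter array.  Objective: alternative algorithm; no speed claim.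

-- ===== PORT A =====
-- All list indices reached by the loops satisfy i < nums.length, so Python's
-- nums[i] / counter[i] raise nothing; `getD _ 0` and `List.set` are exact there.
def innerStepA (a : List Int) (i4 : Nat) (s : Int × List Int × Int) (i2 : Nat) :
    Int × List Int × Int :=
  let res := s.1; let counter := s.2.1; let bigger := s.2.2
  if a.getD i2 0 < a.getD i4 0 then
    (res + counter.getD i2 0, counter, bigger + 1)
  else
    (res, counter.set i2 (counter.getD i2 0 + bigger), bigger)

def outerStepA (a : List Int) (s : Int × List Int) (i4 : Nat) : Int × List Int :=
  let r := (List.range i4).foldl (innerStepA a i4) (s.1, s.2, 0)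
  (r.1, r.2.1)

def count1324 (nums : List Int) : Int :=
  ((List.range nums.length).foldl (outerStepA nums)
    (0, List.replicate nums.length 0)).1

-- ===== PORT B =====
-- Faithful transliteration of Source B: suffix matrix G built by a backward pass
-- (loop over reversed range + final reverse), then the (i2,i3) double loop with
-- an incrementally updated prefix-count row.  Indices are always in range, so
-- Python's nums[i] / row[i] / G[i][j] raise nothing; `getD` is exact there.
def count1324_alt (nums : List Int) : Int :=
  let n := nums.length
  let g := ((List.range n).reverse).foldl
      (fun (s : List (List Int) × List Int) i3 =>
        (s.1 ++ [s.2],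
         (List.range n).map (fun j =>
           s.2.getD j 0 + if nums.getD i3 0 > nums.getD j 0 then 1 else 0)))
      (([] : List (List Int)), List.replicate n (0 : Int))
  let G := g.1.reverse
  (((List.range n).foldl
      (fun (s : Int × List Int) i2 =>
        ((List.range n).foldl
           (fun res i3 =>
             if i2 < i3 ∧ nums.getD i3 0 ≤ nums.getD i2 0 then
               res + s.2.getD i3 0 * ((G.getD i3 []).getD i2 0)
             else res) s.1,
         (List.range n).map (fun j =>
           s.2.getD j 0 + if nums.getD i2 0 < nums.getD j 0 then 1 else 0)))
      (0, List.replicate n (0 : Int)))).1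

-- ===== PRECONDITION & SPEC =====
def Spec_count1324 (nums : List Int) (out : Int) : Prop := out = count1324_alt nums
instance (nums : List Int) (out : Int) : Decidable (Spec_count1324 nums out) := by unfold Spec_count1324; infer_instance

-- ===== CLAIM (what is proved, stated in full; the proofs are below) =====
def Claim_equal_count1324 : Prop := ∀ (nums : List Int), Dom_count1324 nums → Spec_count1324 nums (count1324 nums)

-- ===== LEMMAS AND PROOFS =====

-- number of i1 < j with a[i1] < a[k]
def lcnt (a : List Int) (j k : Nat) : Nat :=
  ((List.range j).filter (fun i => decide (a.getD i 0 < a.getD k 0))).length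

-- value of A's counter[j] after the first t outer iterations
def ctr (a : List Int) (t j : Nat) : Int :=
  (((List.range t).filter
      (fun k => decide (j < k ∧ a.getD k 0 ≤ a.getD j 0))).map
    (fun k => (lcnt a j k : Int))).sum

-- value of A's res after the first t outer iterations
def sumRes (a : List Int) : Nat → Int
  | 0 => 0
  | t+1 => sumRes a t +
      (((List.range t).filter (fun i2 => decide (a.getD i2 0 < a.getD t 0))).map
        (fun i2 => ctr a t i2)).sum

-- the common triple-sum both programs compute
def F (a : List Int) (i2 i3 i4 : Nat) : Int :=
  if i2 < i3 ∧ i3 < i4 ∧ a.getD i3 0 ≤ a.getD i2 0 ∧ a.getD i2 0 < a.getD i4 0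
  then (lcnt a i2 i3 : Int) else 0


-- ===== generic helpers =====

theorem getD_map_range (g : Nat → Int) {i n : Nat} (h : i < n) :
    ((List.range n).map g).getD i 0 = g i := by
  rw [List.getD_eq_getElem?_getD]
  simp [h]

theorem set_map_range (g : Nat → Int) {j n : Nat} (h : j < n) (v : Int) :
    ((List.range n).map g).set j v =
      (List.range n).map (fun i => if i = j then v else g i) := by
  apply List.ext_getElem
  · simp
  · intro i h1 h2
    simp only [List.getElem_set, List.getElem_map, List.getElem_range]
    by_cases hij : j = i
    · simp [hij]
    · rw [if_neg hij, if_neg (fun h' : i = j => hij h'.symm)]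

theorem sum_map_range (f : ℕ → Int) (n : ℕ) :
    ((List.range n).map f).sum = ∑ i ∈ Finset.range n, f i := by
  induction n with
  | zero => simp
  | succ n ih => simp [List.range_succ, Finset.sum_range_succ, ih]

theorem filter_map_sum (p : ℕ → Bool) (f : ℕ → Int) (l : List ℕ) :
    ((l.filter p).map f).sum = (l.map (fun x => if p x then f x else 0)).sum := by
  induction l with
  | nil => simp
  | cons x xs ih =>
    by_cases hx : p x <;> simp [hx, ih]

theorem countP_cast_sum (p : ℕ → Bool) (l : List ℕ) :
    ((l.countP p : Int)) = (l.map (fun x => if p x then (1 : Int) else 0)).sum := by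
  induction l with
  | nil => simp
  | cons x xs ih =>
    by_cases hx : p x <;> simp [hx, ih, add_comm]

theorem sum_range_extend (f : ℕ → Int) {t n : ℕ} (h : t ≤ n) :
    ∑ i ∈ Finset.range t, f i = ∑ i ∈ Finset.range n, if i < t then f i else 0 := by
  have h1 : ∑ i ∈ Finset.range t, f i = ∑ i ∈ Finset.range t, if i < t then f i else 0 :=
    Finset.sum_congr rfl fun i hi => by simp [Finset.mem_range.1 hi]
  rw [h1]
  refine Finset.sum_subset (fun x hx => Finset.mem_range.2 (lt_of_lt_of_le (Finset.mem_range.1 hx) h)) (fun i _ hi => ?_)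
  have : ¬ i < t := fun hc => hi (Finset.mem_range.2 hc)
  simp [this]

theorem filter_sum_snoc (p : ℕ → Bool) (f : ℕ → Int) (l : List ℕ) (x : ℕ) :
    (((l ++ [x]).filter p).map f).sum = ((l.filter p).map f).sum + (if p x then f x else 0) := by
  by_cases hx : p x <;> simp [List.filter_append, hx]

theorem filter_len_snoc (p : ℕ → Bool) (l : List ℕ) (x : ℕ) :
    ((l ++ [x]).filter p).length = (l.filter p).length + (if p x then 1 else 0) := by
  by_cases hx : p x <;> simp [List.filter_append, hx]

theorem inner_inv (a : List Int) (t : Nat) (ht : t < a.length) (res0 : Int)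
    (m : Nat) (hm : m ≤ t) :
    (List.range m).foldl (innerStepA a t)
      (res0, (List.range a.length).map (fun j => ctr a t j), 0) =
    (res0 + (((List.range m).filter
        (fun i2 => decide (a.getD i2 0 < a.getD t 0))).map (fun i2 => ctr a t i2)).sum,
     (List.range a.length).map
       (fun j => if j < m ∧ a.getD t 0 ≤ a.getD j 0 then ctr a t j + (lcnt a j t : Int)
                 else ctr a t j),
     (lcnt a m t : Int)) := by
  induction m with
  | zero =>
    simp [lcnt]
  | succ m ih =>
    have hm' : m ≤ t := Nat.le_of_succ_le hm
    have hmn : m < a.length := by omega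
    rw [List.range_succ, List.foldl_append, ih hm']
    simp only [List.foldl_cons, List.foldl_nil]
    unfold innerStepA
    simp only []
    by_cases h : a.getD m 0 < a.getD t 0
    · rw [if_pos h]
      have hC : ¬ a.getD t 0 ≤ a.getD m 0 := not_le.2 h
      have hg := getD_map_range
        (fun j => if j < m ∧ a.getD t 0 ≤ a.getD j 0 then ctr a t j + (lcnt a j t : Int)
                  else ctr a t j) hmn
      simp only [Prod.mk.injEq]
      refine ⟨?_, ?_, ?_⟩
      · rw [hg]; beta_reduce
        rw [if_neg (by omega : ¬ (m < m ∧ a.getD t 0 ≤ a.getD m 0))]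
        rw [filter_sum_snoc, if_pos (decide_eq_true h)]
        ring
      · apply List.map_congr_left
        intro j _
        have hiff : (j < m + 1 ∧ a.getD t 0 ≤ a.getD j 0) ↔
                    (j < m ∧ a.getD t 0 ≤ a.getD j 0) := by
          constructor
          · rintro ⟨h1, h2⟩
            refine ⟨?_, h2⟩
            rcases Nat.lt_succ_iff_lt_or_eq.1 h1 with h3 | h3
            · exact h3
            · exact absurd (h3 ▸ h2) hC
          · rintro ⟨h1, h2⟩; exact ⟨by omega, h2⟩
        rw [if_congr hiff rfl rfl]
      · have : lcnt a (m + 1) t = lcnt a m t + 1 := by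
          rw [lcnt, List.range_succ, filter_len_snoc, if_pos (decide_eq_true h), lcnt]
        rw [this]; push_cast; ring
    · rw [if_neg h]
      have hle : a.getD t 0 ≤ a.getD m 0 := not_lt.1 h
      have hg := getD_map_range
        (fun j => if j < m ∧ a.getD t 0 ≤ a.getD j 0 then ctr a t j + (lcnt a j t : Int)
                  else ctr a t j) hmn
      simp only [Prod.mk.injEq]
      refine ⟨?_, ?_, ?_⟩
      · rw [filter_sum_snoc, if_neg (by simpa using h)]
        ring
      · rw [hg]; beta_reduce
        rw [if_neg (by omega : ¬ (m < m ∧ a.getD t 0 ≤ a.getD m 0))]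
        rw [set_map_range _ hmn]
        apply List.map_congr_left
        intro j _
        by_cases hj : j = m
        · rw [if_pos hj, hj, if_pos ⟨Nat.lt_succ_self m, hle⟩]
        · rw [if_neg hj]
          have hiff : (j < m + 1 ∧ a.getD t 0 ≤ a.getD j 0) ↔
                      (j < m ∧ a.getD t 0 ≤ a.getD j 0) := by
            constructor
            · rintro ⟨h1, h2⟩
              refine ⟨?_, h2⟩
              rcases Nat.lt_succ_iff_lt_or_eq.1 h1 with h3 | h3
              · exact h3
              · exact absurd h3 hj
            · rintro ⟨h1, h2⟩; exact ⟨by omega, h2⟩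
          rw [if_congr hiff rfl rfl]
      · have : lcnt a (m + 1) t = lcnt a m t := by
          rw [lcnt, List.range_succ, filter_len_snoc, if_neg (by simpa using h), lcnt]
          ring
        rw [this]

theorem ctr_succ (a : List Int) (t j : Nat) :
    ctr a (t + 1) j =
      if j < t ∧ a.getD t 0 ≤ a.getD j 0 then ctr a t j + (lcnt a j t : Int)
      else ctr a t j := by
  unfold ctr
  rw [List.range_succ, filter_sum_snoc]
  by_cases hc : j < t ∧ a.getD t 0 ≤ a.getD j 0
  · rw [if_pos (decide_eq_true hc), if_pos hc]
  · rw [if_neg (by simpa using hc), if_neg hc, add_zero]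

theorem outer_inv (a : List Int) (t : Nat) (ht : t ≤ a.length) :
    (List.range t).foldl (outerStepA a) (0, List.replicate a.length 0) =
    (sumRes a t, (List.range a.length).map (fun j => ctr a t j)) := by
  induction t with
  | zero =>
    refine Prod.ext rfl ?_
    apply List.ext_getElem
    · simp
    · intro i h1 h2
      simp [ctr]
  | succ t ih =>
    have ht' : t ≤ a.length := Nat.le_of_succ_le ht
    have htlt : t < a.length := ht
    rw [List.range_succ, List.foldl_append, ih ht']
    simp only [List.foldl_cons, List.foldl_nil, outerStepA]
    rw [inner_inv a t htlt (sumRes a t) t le_rfl]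
    simp only [Prod.mk.injEq]
    refine ⟨?_, ?_⟩
    · conv_rhs => rw [sumRes]
    · apply List.map_congr_left
      intro j _
      rw [ctr_succ]

theorem ctr_eq_sum (a : List Int) {t : ℕ} (htn : t ≤ a.length) (i2 : ℕ) :
    ctr a t i2 = ∑ i3 ∈ Finset.range a.length,
      if i3 < t ∧ i2 < i3 ∧ a.getD i3 0 ≤ a.getD i2 0 then (lcnt a i2 i3 : Int) else 0 := by
  unfold ctr
  rw [filter_map_sum, sum_map_range, sum_range_extend _ htn]
  refine Finset.sum_congr rfl fun i3 _ => ?_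
  simp only [decide_eq_true_eq]
  split_ifs with hA hB hC hD <;> first | rfl | tauto

theorem rowSum_eq (a : List Int) {t : ℕ} (htn : t < a.length) :
    (((List.range t).filter (fun i2 => decide (a.getD i2 0 < a.getD t 0))).map
        (fun i2 => ctr a t i2)).sum =
      ∑ i2 ∈ Finset.range a.length, ∑ i3 ∈ Finset.range a.length, F a i2 i3 t := by
  rw [filter_map_sum, sum_map_range, sum_range_extend _ (le_of_lt htn)]
  refine Finset.sum_congr rfl fun i2 _ => ?_
  simp only [decide_eq_true_eq]
  by_cases h2 : i2 < t ∧ a.getD i2 0 < a.getD t 0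
  · rw [if_pos h2.1, if_pos h2.2, ctr_eq_sum a (le_of_lt htn)]
    refine Finset.sum_congr rfl fun i3 _ => ?_
    unfold F
    split_ifs with hA hB <;> first | rfl | tauto
  · have hz : (if i2 < t then if a.getD i2 0 < a.getD t 0 then ctr a t i2 else 0 else 0) = 0 := by
      split_ifs with hA hB <;> first | rfl | exact absurd ⟨hA, hB⟩ h2
    rw [hz]
    refine (Finset.sum_eq_zero fun i3 _ => ?_).symm
    unfold F
    rw [if_neg]
    rintro ⟨hc1, hc2, _, hc4⟩
    exact h2 ⟨lt_trans hc1 hc2, hc4⟩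

theorem sumRes_eq_triple (a : List Int) (t : ℕ) (htn : t ≤ a.length) :
    sumRes a t = ∑ i4 ∈ Finset.range t, ∑ i2 ∈ Finset.range a.length,
      ∑ i3 ∈ Finset.range a.length, F a i2 i3 i4 := by
  induction t with
  | zero => simp [sumRes]
  | succ t ih =>
    rw [sumRes, Finset.sum_range_succ, ih (Nat.le_of_succ_le htn),
        rowSum_eq a (htn : t < a.length)]

theorem A_eq_tripleSum (a : List Int) :
    count1324 a =
      ∑ i4 ∈ Finset.range a.length, ∑ i2 ∈ Finset.range a.length,
        ∑ i3 ∈ Finset.range a.length, F a i2 i3 i4 := by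
  have h1 : count1324 a = sumRes a a.length := by
    unfold count1324
    rw [outer_inv a a.length le_rfl]
  rw [h1]
  exact sumRes_eq_triple a a.length le_rfl

theorem foldl_ite_add (p : ℕ → Prop) [DecidablePred p] (g : ℕ → Int) (l : List ℕ) (r0 : Int) :
    l.foldl (fun r x => if p x then r + g x else r) r0 =
      r0 + (l.map (fun x => if p x then g x else 0)).sum := by
  induction l generalizing r0 with
  | nil => simp
  | cons x xs ih =>
    by_cases hx : p x <;> simp [hx, ih, add_assoc]

theorem getD_map_range' {α : Type} (g : ℕ → α) (d : α) {i n : Nat} (h : i < n) :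
    ((List.range n).map g).getD i d = g i := by
  rw [List.getD_eq_getElem?_getD]
  simp [h]

-- number of i4 with t ≤ i4 < a.length and a[j] < a[i4]
def gcnt (a : List Int) (t j : Nat) : Nat :=
  ((List.range a.length).filter
    (fun i4 => decide (t ≤ i4 ∧ a.getD j 0 < a.getD i4 0))).length

def rowG (a : List Int) (t : Nat) : List Int :=
  (List.range a.length).map (fun j => (gcnt a t j : Int))

def rowL (a : List Int) (m : Nat) : List Int :=
  (List.range a.length).map (fun j => (lcnt a m j : Int))

theorem gcnt_cast_sum (a : List Int) (t j : Nat) :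
    ((gcnt a t j : Int)) = ∑ i4 ∈ Finset.range a.length,
      if t ≤ i4 ∧ a.getD j 0 < a.getD i4 0 then (1 : Int) else 0 := by
  unfold gcnt
  rw [← List.countP_eq_length_filter, countP_cast_sum, sum_map_range]
  exact Finset.sum_congr rfl fun i4 _ => by simp only [decide_eq_true_eq]

theorem gcnt_succ (a : List Int) {m : ℕ} (hm : m < a.length) (j : ℕ) :
    ((gcnt a m j : Int)) =
      (gcnt a (m + 1) j : Int) + (if a.getD j 0 < a.getD m 0 then 1 else 0) := by
  rw [gcnt_cast_sum, gcnt_cast_sum]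
  have hsplit : ∀ i4 ∈ Finset.range a.length,
      (if m ≤ i4 ∧ a.getD j 0 < a.getD i4 0 then (1 : Int) else 0) =
        (if m + 1 ≤ i4 ∧ a.getD j 0 < a.getD i4 0 then (1 : Int) else 0) +
        (if i4 = m then (if a.getD j 0 < a.getD m 0 then (1 : Int) else 0) else 0) := by
    intro i4 _
    by_cases he : i4 = m
    · subst he
      by_cases hp : a.getD j 0 < a.getD i4 0
      · rw [if_pos ⟨le_refl i4, hp⟩, if_neg (fun hc => absurd hc.1 (by omega)),
            if_pos rfl, if_pos hp]
        exact (zero_add 1).symm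
      · rw [if_neg (fun hc => hp hc.2), if_neg (fun hc => hp hc.2),
            if_pos rfl, if_neg hp, add_zero]
    · rw [if_neg he, add_zero]
      have hiff : (m ≤ i4 ∧ a.getD j 0 < a.getD i4 0) ↔
          (m + 1 ≤ i4 ∧ a.getD j 0 < a.getD i4 0) :=
        ⟨fun h => ⟨by have := h.1; omega, h.2⟩, fun h => ⟨by have := h.1; omega, h.2⟩⟩
      rw [if_congr hiff rfl rfl]
  rw [Finset.sum_congr rfl hsplit, Finset.sum_add_distrib,
      Finset.sum_ite_eq' (Finset.range a.length) m
        (fun _ => if a.getD j 0 < a.getD m 0 then (1 : Int) else 0),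
      if_pos (Finset.mem_range.2 hm)]

theorem lcnt_succ (a : List Int) (m j : Nat) :
    ((lcnt a (m + 1) j : Int)) =
      (lcnt a m j : Int) + (if a.getD m 0 < a.getD j 0 then 1 else 0) := by
  unfold lcnt
  rw [List.range_succ, filter_len_snoc]
  by_cases h : a.getD m 0 < a.getD j 0
  · rw [if_pos (decide_eq_true h), if_pos h]; push_cast; ring
  · rw [if_neg (by simpa using h), if_neg h]; push_cast; ring

theorem replicate_eq_rowG (a : List Int) :
    List.replicate a.length (0 : Int) = rowG a a.length := by
  apply List.ext_getElem
  · simp [rowG]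
  · intro i h1 h2
    simp only [List.getElem_replicate, rowG, List.getElem_map, List.getElem_range]
    have : gcnt a a.length i = 0 := by
      unfold gcnt
      rw [List.length_eq_zero_iff, List.filter_eq_nil_iff]
      intro x hx
      simp only [decide_eq_true_eq, not_and]
      intro hle
      exact absurd (List.mem_range.1 hx) (not_lt.2 hle)
    rw [this]; rfl

theorem replicate_eq_rowL (a : List Int) :
    List.replicate a.length (0 : Int) = rowL a 0 := by
  apply List.ext_getElem
  · simp [rowL]
  · intro i h1 h2
    simp [rowL, lcnt]

theorem gup_rowG (a : List Int) {m : ℕ} (hm : m < a.length) :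
    (List.range a.length).map (fun j =>
        (rowG a (m + 1)).getD j 0 + if a.getD m 0 > a.getD j 0 then 1 else 0) =
      rowG a m := by
  unfold rowG
  apply List.map_congr_left
  intro j hj
  rw [getD_map_range _ (List.mem_range.1 hj), ← gcnt_succ a hm j]

theorem rowup_rowL (a : List Int) (m : ℕ) :
    (List.range a.length).map (fun j =>
        (rowL a m).getD j 0 + if a.getD m 0 < a.getD j 0 then 1 else 0) =
      rowL a (m + 1) := by
  unfold rowL
  apply List.map_congr_left
  intro j hj
  rw [getD_map_range _ (List.mem_range.1 hj), ← lcnt_succ a m j]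

theorem G_inv (a : List Int) (m : ℕ) (hm : m ≤ a.length) (G0 : List (List Int)) :
    (List.range m).foldr
      (fun i3 (s : List (List Int) × List Int) =>
        (s.1 ++ [s.2],
         (List.range a.length).map (fun j =>
           s.2.getD j 0 + if a.getD i3 0 > a.getD j 0 then 1 else 0)))
      (G0, rowG a m) =
    (G0 ++ (List.range m).reverse.map (fun i3 => rowG a (i3 + 1)), rowG a 0) := by
  induction m generalizing G0 with
  | zero => simp
  | succ m ih =>
    rw [List.range_succ, List.foldr_append]
    simp only [List.foldr_cons, List.foldr_nil]
    rw [gup_rowG a (hm : m < a.length)]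
    rw [ih (Nat.le_of_succ_le hm) (G0 ++ [rowG a (m + 1)])]
    rw [List.reverse_append]
    simp [List.append_assoc]

theorem fin_inv (a : List Int) (t : ℕ) (ht : t ≤ a.length) :
    (List.range t).foldl
      (fun (s : Int × List Int) i2 =>
        ((List.range a.length).foldl
           (fun res i3 =>
             if i2 < i3 ∧ a.getD i3 0 ≤ a.getD i2 0 then
               res + s.2.getD i3 0 *
                 ((((List.range a.length).map (fun i3 => rowG a (i3 + 1))).getD i3 []).getD i2 0)
             else res) s.1,
         (List.range a.length).map (fun j =>
           s.2.getD j 0 + if a.getD i2 0 < a.getD j 0 then 1 else 0)))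
      (0, rowG a a.length) =
    (∑ i2 ∈ Finset.range t, ∑ i3 ∈ Finset.range a.length,
       if i2 < i3 ∧ a.getD i3 0 ≤ a.getD i2 0 then
         (lcnt a i2 i3 : Int) * (gcnt a (i3 + 1) i2 : Int) else 0,
     rowL a t) := by
  induction t with
  | zero =>
    rw [← replicate_eq_rowG, replicate_eq_rowL]
    simp only [List.range_zero, List.foldl_nil, Finset.range_zero, Finset.sum_empty]
  | succ t ih =>
    rw [List.range_succ, List.foldl_append, ih (Nat.le_of_succ_le ht)]
    simp only [List.foldl_cons, List.foldl_nil]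
    refine Prod.ext ?_ (rowup_rowL a t)
    simp only [Finset.sum_range_succ]
    rw [foldl_ite_add (fun i3 => t < i3 ∧ a.getD i3 0 ≤ a.getD t 0), sum_map_range]
    congr 1
    refine Finset.sum_congr rfl fun i3 hi3 => ?_
    have hi3n : i3 < a.length := Finset.mem_range.1 hi3
    rw [getD_map_range' _ _ hi3n]
    unfold rowL rowG
    rw [getD_map_range _ hi3n]
    by_cases hc : t < i3 ∧ a.getD i3 0 ≤ a.getD t 0
    · rw [if_pos hc, if_pos hc]
      by_cases ht2 : t < a.length
      · rw [getD_map_range _ ht2]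
      · omega
    · rw [if_neg hc, if_neg hc]

theorem B_eq_tripleSum (a : List Int) :
    count1324_alt a =
      ∑ i2 ∈ Finset.range a.length, ∑ i3 ∈ Finset.range a.length,
        ∑ i4 ∈ Finset.range a.length, F a i2 i3 i4 := by
  unfold count1324_alt
  simp only []
  rw [List.foldl_reverse, replicate_eq_rowG, G_inv a a.length le_rfl []]
  simp only [List.nil_append]
  rw [List.map_reverse, List.reverse_reverse]
  simp only [fin_inv a a.length le_rfl]
  refine Finset.sum_congr rfl fun i2 _ => ?_
  refine Finset.sum_congr rfl fun i3 _ => ?_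
  by_cases hq : i2 < i3 ∧ a.getD i3 0 ≤ a.getD i2 0
  · rw [if_pos hq, gcnt_cast_sum, Finset.mul_sum]
    refine Finset.sum_congr rfl fun i4 _ => ?_
    unfold F
    rw [mul_ite, mul_one, mul_zero]
    have hiff : (i3 + 1 ≤ i4 ∧ a.getD i2 0 < a.getD i4 0) ↔
        (i2 < i3 ∧ i3 < i4 ∧ a.getD i3 0 ≤ a.getD i2 0 ∧ a.getD i2 0 < a.getD i4 0) := by
      constructor
      · rintro ⟨h1, h2⟩; exact ⟨hq.1, by omega, hq.2, h2⟩
      · rintro ⟨_, h2, _, h4⟩; exact ⟨by omega, h4⟩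
    rw [if_congr hiff rfl rfl]
  · rw [if_neg hq]
    refine (Finset.sum_eq_zero fun i4 _ => ?_).symm
    unfold F
    rw [if_neg]
    rintro ⟨hc1, _, hc3, _⟩
    exact hq ⟨hc1, hc3⟩

-- ===== VERDICT (by name: the statement is the Claim_ definition above) =====
theorem count1324_spec : Claim_equal_count1324 := by
  intro nums _
  show count1324 nums = count1324_alt nums
  rw [A_eq_tripleSum, B_eq_tripleSum, Finset.sum_comm]
  exact Finset.sum_congr rfl fun i2 _ => Finset.sum_comm
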